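-- pv_equiv track=rewrite | github.com/hfeliz03/Advent-of-Code-2025 | Day7/day7.py | beamsHelper
-- ===== SOURCE A (Python) =====
-- def beamsHelper(line, beams):
--     """
--     Given a line and the current beam distribution,
--     returns the updated beam distribution after splitting.
--     """
--     returnBeams = beams.copy()
--     for beam in range(len(beams)):
--         if beam  == 0 : continue
--         if line[beam] == "^" and beams[beam] > 0:
--             if beam > 0 and line[beam-1] != "^":
--                 returnBeams[beam-1] += beams[beam]
--             if beam < len(line) - 1 and line[beam+1] != "^":
--                 returnBeams[beam+1] += beams[beam]
--             returnBeams[beam] = 0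
--     return returnBeams
-- ===== SOURCE B (Python) =====
-- def beamsHelper(line, beams):
--     """Gather formulation: each output cell is computed directly from the
--     original inputs (no mutation of a working copy)."""
--     n = len(beams)
--
--     def cell(j):
--         if j >= 1 and line[j] == "^" and beams[j] > 0:
--             return 0
--         v = beams[j]
--         if j >= 2 and line[j] != "^" and line[j-1] == "^" and beams[j-1] > 0:
--             v += beams[j-1]
--         if j + 1 < n and line[j] != "^" and line[j+1] == "^" and beams[j+1] > 0:
--             v += beams[j+1]
--         return v
--
--     return [cell(j) for j in range(n)]
-- ===== Notes on version B (the rewrite author's own statement) =====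
-- stated objective: alternative
-- what changed: Replaced A's scatter (mutating a copied list from each caret cell) by a gather: each output cell j is computed directly from the original line/beams by reading its two neighbours, built with a list comprehension.
import Mathlib
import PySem

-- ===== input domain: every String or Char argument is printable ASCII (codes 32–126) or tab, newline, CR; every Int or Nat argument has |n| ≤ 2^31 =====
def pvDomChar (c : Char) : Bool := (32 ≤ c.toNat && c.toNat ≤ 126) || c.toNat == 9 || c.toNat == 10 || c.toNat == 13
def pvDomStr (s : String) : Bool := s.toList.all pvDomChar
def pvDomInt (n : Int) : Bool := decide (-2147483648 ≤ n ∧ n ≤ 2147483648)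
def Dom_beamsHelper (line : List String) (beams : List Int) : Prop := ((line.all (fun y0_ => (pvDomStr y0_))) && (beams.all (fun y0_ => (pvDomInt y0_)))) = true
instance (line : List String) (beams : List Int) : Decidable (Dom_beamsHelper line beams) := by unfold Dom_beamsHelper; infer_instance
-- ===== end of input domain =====

-- B replaces A's scatter into a mutated copy with a direct per-cell gather from the original
-- inputs (objective: alternative, same asymptotic cost).

-- ===== PORT A =====
-- the body of A's for-loop over `beam`
def stepA (line : List String) (beams : List Int) (returnBeams : List Int) (beam : Int) : List Int :=
  if beam = 0 then returnBeams
  else if PySem.List.pyGetD line beam "" = "^" ∧ 0 < PySem.List.pyGetD beams beam 0 then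
    let rb1 :=
      if 0 < beam ∧ PySem.List.pyGetD line (beam - 1) "" ≠ "^" then
        PySem.List.pySetD returnBeams (beam - 1)
          (PySem.List.pyGetD returnBeams (beam - 1) 0 + PySem.List.pyGetD beams beam 0)
      else returnBeams
    let rb2 :=
      if beam < (line.length : Int) - 1 ∧ PySem.List.pyGetD line (beam + 1) "" ≠ "^" then
        PySem.List.pySetD rb1 (beam + 1)
          (PySem.List.pyGetD rb1 (beam + 1) 0 + PySem.List.pyGetD beams beam 0)
      else rb1
    PySem.List.pySetD rb2 beam 0
  else returnBeams

def beamsHelper (line : List String) (beams : List Int) : List Int :=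
  (PySem.List.pyRange 0 (beams.length : Int) 1).foldl (stepA line beams) beams

-- ===== PORT B =====
-- B's `cell(j)`
def cellB (line : List String) (beams : List Int) (j : Int) : Int :=
  if 1 ≤ j ∧ PySem.List.pyGetD line j "" = "^" ∧ 0 < PySem.List.pyGetD beams j 0 then 0
  else
    let v := PySem.List.pyGetD beams j 0
    let v := if 2 ≤ j ∧ PySem.List.pyGetD line j "" ≠ "^" ∧
                PySem.List.pyGetD line (j - 1) "" = "^" ∧ 0 < PySem.List.pyGetD beams (j - 1) 0 then
               v + PySem.List.pyGetD beams (j - 1) 0 else v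
    let v := if j + 1 < (beams.length : Int) ∧ PySem.List.pyGetD line j "" ≠ "^" ∧
                PySem.List.pyGetD line (j + 1) "" = "^" ∧ 0 < PySem.List.pyGetD beams (j + 1) 0 then
               v + PySem.List.pyGetD beams (j + 1) 0 else v
    v

def beamsHelper_alt (line : List String) (beams : List Int) : List Int :=
  (PySem.List.pyRange 0 (beams.length : Int) 1).map (cellB line beams)

-- ===== PRECONDITION & SPEC =====
-- Pre_ excludes exactly the inputs on which A raises IndexError: (a) len(line) < len(beams)
-- with len(beams) ≥ 2 (the read line[beam] is out of range), and (b) the last beam index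
-- n-1 is an active caret with n < len(line) and line[n] != "^" (the write returnBeams[n]
-- is out of range).
def Pre_beamsHelper (line : List String) (beams : List Int) : Prop :=
  (beams.length ≤ 1 ∨ beams.length ≤ line.length) ∧
  ¬(2 ≤ beams.length ∧ beams.length < line.length ∧
    line.getD (beams.length - 1) "" = "^" ∧ 0 < beams.getD (beams.length - 1) 0 ∧
    line.getD beams.length "" ≠ "^")
instance (line : List String) (beams : List Int) : Decidable (Pre_beamsHelper line beams) := by
  unfold Pre_beamsHelper; infer_instance
def pvWitness_beamsHelper : List String × List Int := (["x", "^", "x"], [1, 2, 3])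

def Spec_beamsHelper (line : List String) (beams : List Int) (out : List Int) : Prop := out = beamsHelper_alt line beams
instance (line : List String) (beams : List Int) (out : List Int) : Decidable (Spec_beamsHelper line beams out) := by unfold Spec_beamsHelper; infer_instance

-- ===== CLAIM (what is proved, stated in full; the proofs are below) =====
def Claim_equal_beamsHelper : Prop := ∀ (line : List String) (beams : List Int), Dom_beamsHelper line beams → Pre_beamsHelper line beams → Spec_beamsHelper line beams (beamsHelper line beams)

-- ===== LEMMAS AND PROOFS =====

-- value of cell j after A's loop has processed the beam indices < i
def Efun (line : List String) (beams : List Int) (i j : Nat) : Int :=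
  if 1 ≤ j ∧ j < i ∧ line.getD j "" = "^" ∧ 0 < beams.getD j 0 then 0
  else
    beams.getD j 0
    + (if 2 ≤ j ∧ j - 1 < i ∧ line.getD j "" ≠ "^" ∧
          line.getD (j - 1) "" = "^" ∧ 0 < beams.getD (j - 1) 0 then beams.getD (j - 1) 0 else 0)
    + (if j + 1 < i ∧ line.getD j "" ≠ "^" ∧
          line.getD (j + 1) "" = "^" ∧ 0 < beams.getD (j + 1) 0 then beams.getD (j + 1) 0 else 0)


lemma getD_set' (l : List Int) (k : Nat) (v : Int) (j : Nat) :
    (l.set k v).getD j 0 = if j = k ∧ k < l.length then v else l.getD j 0 := by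
  rcases Nat.lt_or_ge j l.length with h | h
  · rw [List.getD_eq_getElem _ _ (by simpa using h), List.getElem_set]
    split_ifs with h1 h2 h3 <;> first | rfl | (exfalso; omega) | (rw [List.getD_eq_getElem _ _ h])
  · rw [List.getD_eq_default _ _ (by simpa using h), List.getD_eq_default _ _ h]
    split_ifs with h1 <;> first | rfl | (exfalso; omega)

-- the loop body leaves the state unchanged when beam i is skipped or not an active caret
lemma Efun_succ_skip (line : List String) (beams : List Int) (i j : Nat)
    (hnc : ∀ k, k = i → 1 ≤ k → ¬(line.getD k "" = "^" ∧ 0 < beams.getD k 0)) :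
    Efun line beams (i + 1) j = Efun line beams i j := by
  have c1 : (1 ≤ j ∧ j < i + 1 ∧ line.getD j "" = "^" ∧ 0 < beams.getD j 0)
      ↔ (1 ≤ j ∧ j < i ∧ line.getD j "" = "^" ∧ 0 < beams.getD j 0) := by
    constructor
    · rintro ⟨a, b, c, d⟩
      refine ⟨a, ?_, c, d⟩
      by_contra hlt
      exact hnc j (by omega) a ⟨c, d⟩
    · rintro ⟨a, b, c, d⟩; exact ⟨a, by omega, c, d⟩
  have c2 : (2 ≤ j ∧ j - 1 < i + 1 ∧ line.getD j "" ≠ "^" ∧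
        line.getD (j - 1) "" = "^" ∧ 0 < beams.getD (j - 1) 0)
      ↔ (2 ≤ j ∧ j - 1 < i ∧ line.getD j "" ≠ "^" ∧
        line.getD (j - 1) "" = "^" ∧ 0 < beams.getD (j - 1) 0) := by
    constructor
    · rintro ⟨a, b, c, d, e⟩
      refine ⟨a, ?_, c, d, e⟩
      by_contra hlt
      exact hnc (j - 1) (by omega) (by omega) ⟨d, e⟩
    · rintro ⟨a, b, c, d, e⟩; exact ⟨a, by omega, c, d, e⟩
  have c3 : (j + 1 < i + 1 ∧ line.getD j "" ≠ "^" ∧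
        line.getD (j + 1) "" = "^" ∧ 0 < beams.getD (j + 1) 0)
      ↔ (j + 1 < i ∧ line.getD j "" ≠ "^" ∧
        line.getD (j + 1) "" = "^" ∧ 0 < beams.getD (j + 1) 0) := by
    constructor
    · rintro ⟨a, b, c, d⟩
      refine ⟨?_, b, c, d⟩
      by_contra hlt
      exact hnc (j + 1) (by omega) (by omega) ⟨c, d⟩
    · rintro ⟨a, b, c, d⟩; exact ⟨by omega, b, c, d⟩
  unfold Efun
  rw [if_congr c1 rfl rfl, if_congr c2 rfl rfl, if_congr c3 rfl rfl]


-- a cell away from the processed beam is unchanged by one loop step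
lemma Efun_succ_skip_far (line : List String) (beams : List Int) (i j : Nat)
    (hi : 1 ≤ i) (h1 : j ≠ i) (h2 : j ≠ i + 1) (h3 : j ≠ i - 1) :
    Efun line beams (i + 1) j = Efun line beams i j := by
  have c1 : (1 ≤ j ∧ j < i + 1 ∧ line.getD j "" = "^" ∧ 0 < beams.getD j 0)
      ↔ (1 ≤ j ∧ j < i ∧ line.getD j "" = "^" ∧ 0 < beams.getD j 0) := by
    constructor <;> rintro ⟨a, b, c, d⟩ <;> exact ⟨a, by omega, c, d⟩
  have c2 : (2 ≤ j ∧ j - 1 < i + 1 ∧ line.getD j "" ≠ "^" ∧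
        line.getD (j - 1) "" = "^" ∧ 0 < beams.getD (j - 1) 0)
      ↔ (2 ≤ j ∧ j - 1 < i ∧ line.getD j "" ≠ "^" ∧
        line.getD (j - 1) "" = "^" ∧ 0 < beams.getD (j - 1) 0) := by
    constructor <;> rintro ⟨a, b, c, d, e⟩ <;> exact ⟨a, by omega, c, d, e⟩
  have c3 : (j + 1 < i + 1 ∧ line.getD j "" ≠ "^" ∧
        line.getD (j + 1) "" = "^" ∧ 0 < beams.getD (j + 1) 0)
      ↔ (j + 1 < i ∧ line.getD j "" ≠ "^" ∧
        line.getD (j + 1) "" = "^" ∧ 0 < beams.getD (j + 1) 0) := by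
    constructor <;> rintro ⟨a, b, c, d⟩ <;> exact ⟨by omega, b, c, d⟩
  unfold Efun
  rw [if_congr c1 rfl rfl, if_congr c2 rfl rfl, if_congr c3 rfl rfl]

set_option maxHeartbeats 1000000 in
lemma foldA_invariant (line : List String) (beams : List Int)
    (hlen : beams.length ≤ 1 ∨ beams.length ≤ line.length) :
    ∀ i, i ≤ beams.length →
      ((PySem.List.pyRange 0 (i : Int) 1).foldl (stepA line beams) beams).length = beams.length ∧
      ∀ j, j < beams.length →
        ((PySem.List.pyRange 0 (i : Int) 1).foldl (stepA line beams) beams).getD j 0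
          = Efun line beams i j := by
  intro i
  induction i with
  | zero =>
    intro _
    rw [PySem.List.pyRange_one_eq_nil (by norm_num)]
    refine ⟨rfl, fun j hj => ?_⟩
    unfold Efun
    rw [if_neg (by omega), if_neg (by omega), if_neg (by omega)]
    simp
  | succ i ih =>
    intro hi
    obtain ⟨hl, hv⟩ := ih (Nat.le_of_succ_le hi)
    have hsplit : PySem.List.pyRange 0 ((i + 1 : Nat) : Int) 1
        = PySem.List.pyRange 0 (i : Nat) 1 ++ [(i : Int)] := by
      have h := PySem.List.pyRange_one_succ_right (a := 0) (b := (i : Int)) (by positivity)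
      push_cast
      exact h
    rw [hsplit, List.foldl_append]
    set s := (PySem.List.pyRange 0 (i : Int) 1).foldl (stepA line beams) beams with hs
    clear_value s
    simp only [List.foldl_cons, List.foldl_nil]
    by_cases hskip : i = 0 ∨ ¬(line.getD i "" = "^" ∧ 0 < beams.getD i 0)
    · -- skipped or inactive beam: state unchanged
      have hnc : ∀ k, k = i → 1 ≤ k → ¬(line.getD k "" = "^" ∧ 0 < beams.getD k 0) := by
        rintro k rfl h1
        rcases hskip with h | h
        · omega
        · exact h
      have hstep : stepA line beams s (i : Int) = s := by
        unfold stepA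
        rcases Nat.eq_zero_or_pos i with h0 | hp
        · subst h0; norm_num
        · rw [if_neg (show ¬((i : Int) = 0) by exact_mod_cast by omega)]
          rw [if_neg (by simpa [PySem.List.pyGetD_natCast] using hnc i rfl (by omega))]
      rw [hstep]
      exact ⟨hl, fun j hj => by rw [hv j hj, ← Efun_succ_skip line beams i j hnc]⟩
    · -- active caret at beam i ≥ 1
      rw [not_or, not_not] at hskip
      obtain ⟨hi0, hS, hB⟩ := hskip
      have hi1' : 1 ≤ i := by omega
      have hin : i < beams.length := by omega
      have hLL : beams.length ≤ line.length := by
        rcases hlen with h | h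
        · omega
        · exact h
      have em1 : ((i : Int) - 1) = ((i - 1 : Nat) : Int) := by omega
      have ep1 : ((i : Int) + 1) = ((i + 1 : Nat) : Int) := by push_cast; ring
      have hRiff : ((i : Int) < (line.length : Int) - 1) ↔ (i + 1 < line.length) := by omega
      have hLiff : ((0 : Int) < (i : Int) ∧ line.getD (i - 1) "" ≠ "^")
          ↔ (line.getD (i - 1) "" ≠ "^") := by
        constructor
        · rintro ⟨-, h⟩; exact h
        · intro h; exact ⟨by exact_mod_cast hi1', h⟩
      have hstep : stepA line beams s (i : Int)
          = ((if i + 1 < line.length ∧ line.getD (i + 1) "" ≠ "^" then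
                (if line.getD (i - 1) "" ≠ "^" then
                    s.set (i - 1) (s.getD (i - 1) 0 + beams.getD i 0) else s).set (i + 1)
                  ((if line.getD (i - 1) "" ≠ "^" then
                      s.set (i - 1) (s.getD (i - 1) 0 + beams.getD i 0) else s).getD (i + 1) 0
                    + beams.getD i 0)
              else (if line.getD (i - 1) "" ≠ "^" then
                  s.set (i - 1) (s.getD (i - 1) 0 + beams.getD i 0) else s))).set i 0 := by
        unfold stepA
        rw [if_neg (show ¬((i : Int) = 0) by exact_mod_cast by omega)]
        rw [if_pos (by simpa [PySem.List.pyGetD_natCast] using ⟨hS, hB⟩)]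
        simp only [em1, ep1, PySem.List.pyGetD_natCast, PySem.List.pySetD_natCast, hRiff, hLiff]
      rw [hstep]
      -- names for the intermediate lists
      set rb1 := (if line.getD (i - 1) "" ≠ "^" then
          s.set (i - 1) (s.getD (i - 1) 0 + beams.getD i 0) else s) with hrb1
      set rb2 := (if i + 1 < line.length ∧ line.getD (i + 1) "" ≠ "^" then
          rb1.set (i + 1) (rb1.getD (i + 1) 0 + beams.getD i 0) else rb1) with hrb2
      have hlrb1 : rb1.length = beams.length := by
        rw [hrb1]; split_ifs <;> simp [hl]
      have hlrb2 : rb2.length = beams.length := by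
        rw [hrb2]; split_ifs <;> simp [hlrb1]
      clear_value rb1 rb2
      refine ⟨by simp [hlrb2], fun j hj => ?_⟩
      rw [getD_set']
      by_cases hji : j = i
      · subst hji
        rw [if_pos ⟨rfl, by omega⟩]
        unfold Efun
        rw [if_pos ⟨hi1', by omega, hS, hB⟩]
      · rw [if_neg (fun h => hji h.1)]
        have hrb1getD : ∀ k, k < beams.length → k ≠ i - 1 → rb1.getD k 0 = Efun line beams i k := by
          intro k hk hkne
          rw [hrb1]
          split_ifs with hL
          · rw [getD_set', if_neg (fun h => hkne h.1)]
            exact hv k hk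
          · exact hv k hk
        by_cases hji1 : j = i + 1
        · -- cell i+1 may receive the caret's beam
          subst hji1
          have hi1n : i + 1 < beams.length := hj
          have hrb2v : rb2.getD (i + 1) 0
              = Efun line beams i (i + 1)
                + (if line.getD (i + 1) "" ≠ "^" then beams.getD i 0 else 0) := by
            have hbase := hrb1getD (i + 1) hj (by omega)
            rw [hrb2]
            split_ifs with hR hN hN
            · rw [getD_set', if_pos ⟨rfl, by omega⟩, hbase]
            · exact absurd hR.2 hN
            · exact absurd ⟨by omega, hN⟩ hR
            · rw [hbase]; ring
          rw [hrb2v]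
          unfold Efun
          simp only [Nat.add_sub_cancel]
          have f1 : (i + 1 < i) = False := eq_false (by omega)
          have f2 : (i < i) = False := eq_false (by omega)
          have f3 : (i + 1 + 1 < i) = False := eq_false (by omega)
          have f4 : (i + 1 < i + 1) = False := eq_false (by omega)
          have f5 : (i + 1 + 1 < i + 1) = False := eq_false (by omega)
          have t1 : (2 ≤ i + 1) = True := eq_true (by omega)
          have t2 : (i < i + 1) = True := eq_true (by omega)
          simp only [f1, f2, f3, f4, f5, t1, t2, false_and, and_false, true_and, if_false]
          by_cases hN : line.getD (i + 1) "" ≠ "^"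
          · rw [if_pos hN, if_pos ⟨hN, hS, hB⟩]
            ring
          · rw [if_neg hN, if_neg (fun h => hN h.1)]
            ring
        · -- j ≠ i, j ≠ i+1 : untouched by the right write and the zeroing
          have hrb2j : rb2.getD j 0 = rb1.getD j 0 := by
            rw [hrb2]
            split_ifs with hR
            · rw [getD_set', if_neg (fun h => hji1 h.1)]
            · rfl
          rw [hrb2j]
          by_cases hjm1 : j = i - 1
          · -- cell i-1 may receive the caret's beam
            subst hjm1
            have hrb1v : rb1.getD (i - 1) 0
                = Efun line beams i (i - 1)
                  + (if line.getD (i - 1) "" ≠ "^" then beams.getD i 0 else 0) := by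
              rw [hrb1]
              split_ifs with hL
              · rw [getD_set', if_pos ⟨rfl, by omega⟩, hv (i - 1) (by omega)]
              · rw [hv (i - 1) (by omega)]; ring
            rw [hrb1v]
            unfold Efun
            simp only [Nat.sub_add_cancel hi1']
            have g1 : (i - 1 < i) = True := eq_true (by omega)
            have g2 : (i - 1 < i + 1) = True := eq_true (by omega)
            have g3 : (i < i) = False := eq_false (by omega)
            have g4 : (i < i + 1) = True := eq_true (by omega)
            have g5 : (i - 1 - 1 < i) = True := eq_true (by omega)
            have g6 : (i - 1 - 1 < i + 1) = True := eq_true (by omega)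
            simp only [g1, g2, g3, g4, g5, g6, false_and, true_and, if_false]
            by_cases hC1 : 1 ≤ i - 1 ∧ line.getD (i - 1) "" = "^" ∧ 0 < beams.getD (i - 1) 0
            · rw [if_pos hC1, if_pos hC1, if_neg (fun hL => hL hC1.2.1)]
              ring
            · rw [if_neg hC1, if_neg hC1]
              by_cases hL : line.getD (i - 1) "" ≠ "^"
              · rw [if_pos hL,
                  if_pos (show (line.getD (i - 1) "" ≠ "^") ∧ line.getD i "" = "^"
                      ∧ 0 < beams.getD i 0 from ⟨hL, hS, hB⟩)]
                ring
              · rw [if_neg hL,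
                  if_neg (show ¬((line.getD (i - 1) "" ≠ "^") ∧ line.getD i "" = "^"
                      ∧ 0 < beams.getD i 0) from fun h => hL h.1)]
                ring
          · -- far cell: untouched, and its Efun value is unchanged
            have hrb1j : rb1.getD j 0 = Efun line beams i j := hrb1getD j hj hjm1
            rw [hrb1j]
            exact (Efun_succ_skip_far line beams i j hi1' hji hji1 hjm1).symm

set_option maxHeartbeats 3000000 in
lemma cellB_eq_Efun (line : List String) (beams : List Int) (j : Nat) (hj : j < beams.length) :
    cellB line beams (j : Int) = Efun line beams beams.length j := by
  unfold cellB Efun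
  have ej1 : ((j : Int) + 1) = ((j + 1 : Nat) : Int) := by push_cast; ring
  have hj1 : j - 1 < beams.length := by omega
  rcases Nat.lt_or_ge j 2 with h2 | h2
  · have h2' : ¬(2 ≤ j) := by omega
    simp only [ej1, PySem.List.pyGetD_natCast, Nat.one_le_cast, Nat.ofNat_le_cast, Nat.cast_lt]
    split_ifs <;> first | tauto | ring
  · have e1 : ((j : Int) - 1) = ((j - 1 : Nat) : Int) := by omega
    simp only [e1, ej1, PySem.List.pyGetD_natCast, Nat.one_le_cast, Nat.ofNat_le_cast, Nat.cast_lt]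
    split_ifs <;> first | tauto | ring


-- ===== VERDICT (by name: the statement is the Claim_ definition above) =====
theorem beamsHelper_spec : Claim_equal_beamsHelper := by
  intro line beams _ hPre
  unfold Spec_beamsHelper beamsHelper beamsHelper_alt
  obtain ⟨hlen1, hval⟩ := foldA_invariant line beams hPre.1 beams.length le_rfl
  apply List.ext_getElem
  · rw [hlen1, List.length_map, PySem.List.length_pyRange_one]
    omega
  · intro k h1 h2
    have hk : k < beams.length := by rwa [hlen1] at h1
    have hmap : ((PySem.List.pyRange 0 (beams.length : Int) 1).map (cellB line beams))[k]
        = cellB line beams (k : Int) := by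
      rw [List.getElem_map, PySem.List.getElem_pyRange_one]
      simp
    rw [hmap, cellB_eq_Efun line beams k hk, ← hval k hk]
    exact (List.getD_eq_getElem _ 0 h1).symm
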